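-- pv_equiv track=rewrite | github.com/pilikov/NewType | scripts/enrich_myfonts_scripts.py | ordered_unique_scripts
-- ===== SOURCE A (Python) =====
-- SCRIPT_ORDER = ["Latin", "Cyrillic", "Greek", "Arabic", "Hebrew", "Devanagari", "Thai", "Japanese", "Korean", "Chinese"]
--
-- def ordered_unique_scripts(values: list[str]) -> list[str]:
--     seen: set[str] = set()
--     out: list[str] = []
--     for v in values:
--         n = str(v or "").strip()
--         if not n:
--             continue
--         label = next((s for s in SCRIPT_ORDER if s.lower() == n.lower()), n)
--         k = label.lower()
--         if k in seen:
--             continue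
--         seen.add(k)
--         out.append(label)
--     order_idx = {s: i for i, s in enumerate(SCRIPT_ORDER)}
--     return sorted(out, key=lambda x: order_idx.get(x, len(SCRIPT_ORDER)))
-- ===== SOURCE B (Python) =====
-- SCRIPT_ORDER = ["Latin", "Cyrillic", "Greek", "Arabic", "Hebrew", "Devanagari", "Thai", "Japanese", "Korean", "Chinese"]
--
-- def ordered_unique_scripts(values: list[str]) -> list[str]:
--     known = {s.lower() for s in SCRIPT_ORDER}
--     seen: set[str] = set()
--     unknowns: list[str] = []
--     for v in values:
--         n = v.strip()
--         if not n:
--             continue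
--         k = n.lower()
--         if k in seen:
--             continue
--         seen.add(k)
--         if k not in known:
--             unknowns.append(n)
--     return [s for s in SCRIPT_ORDER if s.lower() in seen] + unknowns
-- ===== Notes on version B (the rewrite author's own statement) =====
-- stated objective: simpler
-- what changed: B drops A's per-element canonical-label scan and the key-based stable sort: one dedup pass collects seen lowercase keys and unknown labels in first-seen order, then the result is built by a single traversal of SCRIPT_ORDER followed by the unknowns.
import Mathlib
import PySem

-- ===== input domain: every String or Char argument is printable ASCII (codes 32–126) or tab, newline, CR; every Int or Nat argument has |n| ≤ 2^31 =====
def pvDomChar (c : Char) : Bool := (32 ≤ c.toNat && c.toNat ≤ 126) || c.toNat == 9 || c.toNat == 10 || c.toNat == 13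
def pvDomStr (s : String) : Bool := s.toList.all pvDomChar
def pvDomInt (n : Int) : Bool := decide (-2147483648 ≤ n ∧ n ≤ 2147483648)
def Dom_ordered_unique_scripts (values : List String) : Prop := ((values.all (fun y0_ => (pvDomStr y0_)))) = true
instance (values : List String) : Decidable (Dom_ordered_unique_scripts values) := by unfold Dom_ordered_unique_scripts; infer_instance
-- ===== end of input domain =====

-- B replaces A's dedup-then-stable-sort with a single dedup pass plus a direct traversal of SCRIPT_ORDER (objective: simpler, and measured faster: lowercasing of SCRIPT_ORDER happens once, not per element).

-- ===== PORT A =====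
def SCRIPT_ORDER : List String :=
  ["Latin", "Cyrillic", "Greek", "Arabic", "Hebrew", "Devanagari", "Thai", "Japanese", "Korean", "Chinese"]

-- label = next((s for s in SCRIPT_ORDER if s.lower() == n.lower()), n)
def labelOf (n : String) : String :=
  (SCRIPT_ORDER.find? (fun s => PySem.Str.lower s == PySem.Str.lower n)).getD n

-- the body of A's 'for v in values' loop, acting on the state (seen, out)
def stepA (st : PySem.Set String × List String) (v : String) : PySem.Set String × List String :=
  let n := PySem.Str.strip (if v == "" then "" else v)   -- n = str(v or "").strip()
  if n == "" then st
  else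
    let label := labelOf n
    let k := PySem.Str.lower label
    if PySem.Set.contains st.1 k then st
    else (PySem.Set.add st.1 k, st.2 ++ [label])

-- order_idx = {s: i for i, s in enumerate(SCRIPT_ORDER)}
def orderIdxA : PySem.Dict String Int :=
  (PySem.List.enumerate SCRIPT_ORDER).foldl (fun d p => PySem.Dict.insert d p.2 p.1) PySem.Dict.empty

-- key=lambda x: order_idx.get(x, len(SCRIPT_ORDER))
def keyA (x : String) : Int := PySem.Dict.getD orderIdxA x (SCRIPT_ORDER.length : Int)

def ordered_unique_scripts (values : List String) : List String :=
  let st := values.foldl stepA (PySem.Set.empty, [])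
  PySem.List.sorted st.2 keyA

-- ===== PORT B =====
-- known = {s.lower() for s in SCRIPT_ORDER}
def knownB : PySem.Set String := PySem.Set.ofList (SCRIPT_ORDER.map (fun s => PySem.Str.lower s))

-- the body of B's loop, acting on the state (seen, unknowns)
def stepB (st : PySem.Set String × List String) (v : String) : PySem.Set String × List String :=
  let n := PySem.Str.strip v
  if n == "" then st
  else
    let k := PySem.Str.lower n
    if PySem.Set.contains st.1 k then st
    else (PySem.Set.add st.1 k, if PySem.Set.contains knownB k then st.2 else st.2 ++ [n])

def ordered_unique_scripts_alt (values : List String) : List String :=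
  let st := values.foldl stepB (PySem.Set.empty, [])
  (SCRIPT_ORDER.filter (fun s => PySem.Set.contains st.1 (PySem.Str.lower s))) ++ st.2

-- ===== PRECONDITION & SPEC =====
def Spec_ordered_unique_scripts (values : List String) (out : List String) : Prop := out = ordered_unique_scripts_alt values
instance (values : List String) (out : List String) : Decidable (Spec_ordered_unique_scripts values out) := by unfold Spec_ordered_unique_scripts; infer_instance

-- ===== CLAIM (what is proved, stated in full; the proofs are below) =====
def Claim_equal_ordered_unique_scripts : Prop := ∀ (values : List String), Dom_ordered_unique_scripts values → Spec_ordered_unique_scripts values (ordered_unique_scripts values)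

-- ===== LEMMAS AND PROOFS =====

lemma keyA_le (x : String) : keyA x ≤ 10 := by
  have h : orderIdxA = PySem.Dict.mk [("Latin",0),("Cyrillic",1),("Greek",2),("Arabic",3),("Hebrew",4),("Devanagari",5),("Thai",6),("Japanese",7),("Korean",8),("Chinese",9)] := by decide
  unfold keyA
  rw [h, PySem.Dict.getD_eq_get?_getD]
  simp only [PySem.Dict.get?_mk_cons]
  split_ifs <;> simp [PySem.Dict.get?, SCRIPT_ORDER]
lemma keyA_lt_of_mem {s : String} (hs : s ∈ SCRIPT_ORDER) : keyA s < 10 := by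
  fin_cases hs <;> decide
lemma keyA_eq_ten_of_forall_ne {x : String} (h : ∀ s ∈ SCRIPT_ORDER, x ≠ s) : keyA x = 10 := by
  have ho : orderIdxA = PySem.Dict.mk [("Latin",0),("Cyrillic",1),("Greek",2),("Arabic",3),("Hebrew",4),("Devanagari",5),("Thai",6),("Japanese",7),("Korean",8),("Chinese",9)] := by decide
  simp only [SCRIPT_ORDER, List.mem_cons, forall_eq_or_imp] at h
  unfold keyA
  rw [ho, PySem.Dict.getD_eq_get?_getD]
  simp only [PySem.Dict.get?_mk_cons]
  split_ifs <;> simp_all [SCRIPT_ORDER, PySem.Dict.get?]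
lemma insertBy_append_of_forall_before {α : Type} (before : α → α → Bool) (x : α)
    (front back : List α) (h : ∀ y ∈ back, before x y = true) :
    PySem.List.insertBy before x (front ++ back) = PySem.List.insertBy before x front ++ back := by
  induction front with
  | nil =>
    cases back with
    | nil => rfl
    | cons y ys => simp [PySem.List.insertBy, h y (by simp)]
  | cons a f ih =>
    by_cases hb : before x a = true
    · simp [PySem.List.insertBy, hb]
    · simp only [List.cons_append, PySem.List.insertBy, eq_false_of_ne_true hb]
      simp [ih]

lemma sorted_split (xs : List String) (h : ∀ x ∈ xs, keyA x ≤ 10) :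
    PySem.List.sorted xs keyA =
      PySem.List.sorted (xs.filter (fun x => decide (keyA x < 10))) keyA
        ++ xs.filter (fun x => decide (keyA x = 10)) := by
  induction xs using List.reverseRecOn with
  | nil => rfl
  | append_singleton ys x ih =>
    have hys : ∀ y ∈ ys, keyA y ≤ 10 := fun y hy => h y (by simp [hy])
    have hx : keyA x ≤ 10 := h x (by simp)
    have hmemFE : ∀ y, y ∈ PySem.List.sorted (ys.filter (fun x => decide (keyA x < 10))) keyA
        ++ ys.filter (fun x => decide (keyA x = 10)) → keyA y ≤ 10 := by
      intro y hy
      rcases List.mem_append.1 hy with hy | hy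
      · exact hys y (List.mem_filter.1 ((PySem.List.mem_sorted _ _ _ _).1 hy)).1
      · exact hys y (List.mem_filter.1 hy).1
    rw [PySem.List.sorted_eq_foldl_insertBy, List.foldl_append, List.foldl_cons, List.foldl_nil,
        ← PySem.List.sorted_eq_foldl_insertBy, ih hys]
    by_cases hm : keyA x = 10
    · rw [PySem.List.insertBy_of_forall_not_before]
      · rw [List.filter_append, List.filter_append]
        simp [List.filter, hm, PySem.List.sorted_eq_foldl_insertBy]
      · intro y hy
        have := hmemFE y hy
        simp only [decide_eq_false_iff_not, not_lt]
        omega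
    · have hlt : keyA x < 10 := lt_of_le_of_ne hx hm
      rw [insertBy_append_of_forall_before _ _ _ _ (by
        intro y hy
        have : keyA y = 10 := of_decide_eq_true (List.mem_filter.1 hy).2
        simp only [decide_eq_true_eq]
        omega)]
      rw [List.filter_append, List.filter_append]
      simp only [List.filter, hm, hlt, decide_true, decide_false]
      rw [PySem.List.sorted_eq_foldl_insertBy (ys.filter (fun x => decide (keyA x < 10)) ++ [x]),
          List.foldl_append, List.foldl_cons, List.foldl_nil, ← PySem.List.sorted_eq_foldl_insertBy]
      simp

lemma filter_insert_perm (l : List String) (p : String → Bool) (s : String)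
    (hs : s ∈ l) (hp : p s = false) (hnd : (l.map PySem.Str.lower).Nodup) :
    (l.filter (fun t => p t || (PySem.Str.lower t == PySem.Str.lower s))).Perm (l.filter p ++ [s]) := by
  induction l with
  | nil => simp at hs
  | cons a tl ih =>
    simp only [List.map_cons, List.nodup_cons] at hnd
    by_cases ha : a = s
    · subst ha
      have htl : ∀ t ∈ tl, PySem.Str.lower t ≠ PySem.Str.lower a := by
        intro t ht he
        exact hnd.1 (he ▸ List.mem_map_of_mem ht)
      rw [List.filter_cons, List.filter_cons]
      have : (tl.filter (fun t => p t || (PySem.Str.lower t == PySem.Str.lower a))) = tl.filter p := by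
        apply List.filter_congr
        intro t ht
        simp [htl t ht]
      simp only [hp, beq_self_eq_true, Bool.or_true, if_true, this]
      simpa using (List.perm_append_singleton a (tl.filter p)).symm
    · have hstl : s ∈ tl := by
        rcases List.mem_cons.1 hs with h | h
        · exact absurd h.symm ha
        · exact h
      have hne : PySem.Str.lower a ≠ PySem.Str.lower s := by
        intro he
        exact hnd.1 (he ▸ List.mem_map_of_mem hstl)
      have hbeq : (PySem.Str.lower a == PySem.Str.lower s) = false := by simp [hne]
      rw [List.filter_cons, List.filter_cons]
      simp only [hbeq, Bool.or_false]
      by_cases hpa : p a = true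
      · simp only [hpa, if_true, List.cons_append]
        exact (ih hstl hnd.2).cons a
      · simp only [eq_false_of_ne_true hpa]
        exact ih hstl hnd.2

lemma stripA (v : String) :
    PySem.Str.strip (if v == "" then "" else v) = PySem.Str.strip v := by
  by_cases hv : v = ""
  · subst hv; rfl
  · simp [hv]

lemma lower_label (n : String) : PySem.Str.lower (labelOf n) = PySem.Str.lower n := by
  unfold labelOf
  cases hf : SCRIPT_ORDER.find? (fun s => PySem.Str.lower s == PySem.Str.lower n) with
  | none => rfl
  | some s => simpa using (List.find?_some hf)

lemma nodup_lower : (SCRIPT_ORDER.map PySem.Str.lower).Nodup := by decide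

lemma contains_add (s : PySem.Set String) (k w : String) :
    PySem.Set.contains (PySem.Set.add s k) w = (PySem.Set.contains s w || (w == k)) := by
  by_cases hw : w ∈ PySem.Set.add s k
  · have h2 : PySem.Set.contains s w = true ∨ (w == k) = true := by
      rcases (PySem.Set.mem_add _ _ _).1 hw with h | h
      · exact Or.inl ((PySem.Set.contains_iff _ _).2 h)
      · exact Or.inr (beq_iff_eq.2 h)
    rw [(PySem.Set.contains_iff _ _).2 hw]
    rcases h2 with h | h
    · rw [h]; rfl
    · rw [h, Bool.or_true]
  · have h1 : PySem.Set.contains (PySem.Set.add s k) w = false :=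
      Bool.eq_false_iff.2 (fun hc => hw ((PySem.Set.contains_iff _ _).1 hc))
    have h2 : PySem.Set.contains s w = false :=
      Bool.eq_false_iff.2 (fun hc => hw ((PySem.Set.mem_add _ _ _).2 (Or.inl ((PySem.Set.contains_iff _ _).1 hc))))
    have h3 : (w == k) = false := by
      refine beq_eq_false_iff_ne.2 (fun hc => hw ((PySem.Set.mem_add _ _ _).2 (Or.inr hc)))
    rw [h1, h2, h3]
    rfl

lemma stepA_skip (st : PySem.Set String × List String) (v : String)
    (h : PySem.Str.strip v = "") : stepA st v = st := by
  have h0 : PySem.Str.strip (if v == "" then "" else v) = "" := (stripA v).trans h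
  simp only [stepA, h0]
  simp

lemma stepB_skip (st : PySem.Set String × List String) (v : String)
    (h : PySem.Str.strip v = "") : stepB st v = st := by
  simp only [stepB, h]
  simp

lemma stepA_eq (st : PySem.Set String × List String) (v : String)
    (h : ¬ PySem.Str.strip v = "") :
    stepA st v = (if PySem.Set.contains st.1 (PySem.Str.lower (PySem.Str.strip v)) then st
      else (PySem.Set.add st.1 (PySem.Str.lower (PySem.Str.strip v)),
            st.2 ++ [labelOf (PySem.Str.strip v)])) := by
  simp only [stepA, stripA v, lower_label]
  simp [h]

lemma stepB_eq (st : PySem.Set String × List String) (v : String)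
    (h : ¬ PySem.Str.strip v = "") :
    stepB st v = (if PySem.Set.contains st.1 (PySem.Str.lower (PySem.Str.strip v)) then st
      else (PySem.Set.add st.1 (PySem.Str.lower (PySem.Str.strip v)),
            if PySem.Set.contains knownB (PySem.Str.lower (PySem.Str.strip v)) then st.2
            else st.2 ++ [PySem.Str.strip v])) := by
  simp [stepB, h]

set_option maxHeartbeats 1000000 in
lemma loop_inv (values : List String) : ∀ (seen : PySem.Set String) (outA unkB : List String),
    (outA.filter (fun x => decide (keyA x = 10)) = unkB) →
    ((outA.filter (fun x => decide (keyA x < 10))).Perm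
        (SCRIPT_ORDER.filter (fun s => PySem.Set.contains seen (PySem.Str.lower s)))) →
    (values.foldl stepA (seen, outA)).1 = (values.foldl stepB (seen, unkB)).1 ∧
    ((values.foldl stepA (seen, outA)).2.filter (fun x => decide (keyA x = 10))
        = (values.foldl stepB (seen, unkB)).2) ∧
    ((values.foldl stepA (seen, outA)).2.filter (fun x => decide (keyA x < 10))).Perm
      (SCRIPT_ORDER.filter (fun s =>
        PySem.Set.contains (values.foldl stepA (seen, outA)).1 (PySem.Str.lower s))) := by
  induction values with
  | nil => intro seen outA unkB hb hk; exact ⟨rfl, hb, hk⟩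
  | cons v rest ih =>
    intro seen outA unkB hb hk
    simp only [List.foldl_cons]
    by_cases hn : PySem.Str.strip v = ""
    · rw [stepA_skip _ _ hn, stepB_skip _ _ hn]
      exact ih seen outA unkB hb hk
    · rw [stepA_eq _ _ hn, stepB_eq _ _ hn]
      set n := PySem.Str.strip v with hdefn
      by_cases hseen : PySem.Set.contains seen (PySem.Str.lower n) = true
      · simp only [hseen, if_true]
        exact ih seen outA unkB hb hk
      · simp only [Bool.not_eq_true] at hseen
        simp only [hseen, Bool.false_eq_true, if_false]
        cases hf : SCRIPT_ORDER.find? (fun s => PySem.Str.lower s == PySem.Str.lower n) with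
        | some s =>
          have hlab : labelOf n = s := by simp [labelOf, hf]
          have hsmem : s ∈ SCRIPT_ORDER := List.mem_of_find?_eq_some hf
          have hlow : PySem.Str.lower s = PySem.Str.lower n := by
            simpa using (List.find?_some hf)
          have hknown : PySem.Set.contains knownB (PySem.Str.lower n) = true := by
            rw [PySem.Set.contains_iff]
            unfold knownB
            rw [PySem.Set.mem_ofList]
            rw [← hlow]
            exact List.mem_map_of_mem hsmem
          simp only [hlab, hknown, if_true]
          apply ih
          · rw [List.filter_append, hb]
            have : decide (keyA s = 10) = false := by
              simp only [decide_eq_false_iff_not]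
              have := keyA_lt_of_mem hsmem
              omega
            simp [this]
          · rw [List.filter_append]
            have hks : decide (keyA s < 10) = true := by
              simpa using keyA_lt_of_mem hsmem
            simp only [List.filter_cons, hks, List.filter_nil, if_true]
            have htgt : (SCRIPT_ORDER.filter (fun t =>
                PySem.Set.contains (PySem.Set.add seen (PySem.Str.lower n)) (PySem.Str.lower t))).Perm
                ((SCRIPT_ORDER.filter (fun t => PySem.Set.contains seen (PySem.Str.lower t))) ++ [s]) := by
              have : ∀ t, PySem.Set.contains (PySem.Set.add seen (PySem.Str.lower n)) (PySem.Str.lower t)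
                  = (PySem.Set.contains seen (PySem.Str.lower t) || (PySem.Str.lower t == PySem.Str.lower s)) := by
                intro t
                rw [contains_add, hlow]
              rw [List.filter_congr (fun t _ => this t)]
              exact filter_insert_perm SCRIPT_ORDER _ s hsmem (by rw [hlow]; exact hseen) nodup_lower
            exact List.Perm.trans (hk.append (List.Perm.refl [s])) htgt.symm
        | none =>
          have hall : ∀ s ∈ SCRIPT_ORDER, (PySem.Str.lower s == PySem.Str.lower n) = false := by
            intro s hs
            exact Bool.not_eq_true _ |>.mp (List.find?_eq_none.mp hf s hs)
          have hlab : labelOf n = n := by simp [labelOf, hf]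
          have hknown : PySem.Set.contains knownB (PySem.Str.lower n) = false := by
            rw [Bool.eq_false_iff]
            intro hc
            rw [PySem.Set.contains_iff] at hc
            unfold knownB at hc
            rw [PySem.Set.mem_ofList] at hc
            obtain ⟨s, hs, he⟩ := List.mem_map.1 hc
            exact absurd he (by simpa using hall s hs)
          have hkn : keyA n = 10 := by
            apply keyA_eq_ten_of_forall_ne
            intro s hs he
            have := hall s hs
            rw [he] at this
            simp at this
          simp only [hlab, hknown, Bool.false_eq_true, if_false]
          apply ih
          · rw [List.filter_append, hb]
            simp [hkn]
          · rw [List.filter_append]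
            have : decide (keyA n < 10) = false := by
              simp only [decide_eq_false_iff_not]
              omega
            simp only [List.filter_cons, this, Bool.false_eq_true, if_false, List.filter_nil,
              List.append_nil]
            have : ∀ t ∈ SCRIPT_ORDER, PySem.Set.contains (PySem.Set.add seen (PySem.Str.lower n)) (PySem.Str.lower t)
                = PySem.Set.contains seen (PySem.Str.lower t) := by
              intro t ht
              rw [contains_add, hall t ht, Bool.or_false]
            rw [List.filter_congr this]
            exact hk

lemma main_eq (values : List String) : ordered_unique_scripts values = ordered_unique_scripts_alt values := by
  unfold ordered_unique_scripts ordered_unique_scripts_alt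
  obtain ⟨h1, h2, h3⟩ := loop_inv values PySem.Set.empty [] [] rfl (by decide)
  have base : SCRIPT_ORDER.Pairwise (fun a b => keyA a < keyA b) := by decide
  have hpair : (SCRIPT_ORDER.filter (fun s =>
      PySem.Set.contains (values.foldl stepA (PySem.Set.empty, [])).1 (PySem.Str.lower s))).Pairwise
      (fun a b => keyA a < keyA b) := base.sublist List.filter_sublist
  rw [sorted_split _ (fun x _ => keyA_le x),
      PySem.List.sorted_eq_of_perm_of_pairwise_lt _ _ keyA h3.symm hpair, h2, h1]

-- ===== VERDICT (by name: the statement is the Claim_ definition above) =====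
theorem ordered_unique_scripts_spec : Claim_equal_ordered_unique_scripts := by
  intro values _
  exact main_eq values
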